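-- pv_equiv track=rewrite | github.com/aberdichevskaia/catalytic-sites-annotation | old_expirements/msa_propagation/prepare_3di_db.py | compute_index_mapping
-- ===== SOURCE A (Python) =====
-- def compute_index_mapping(aligned_filtered, aligned_original):
--     mapping = {}
--     i_f = i_o = 0
--     for a,b in zip(aligned_filtered, aligned_original):
--         if a!='-' and b!='-':
--             mapping[i_f] = i_o
--             i_f += 1; i_o += 1
--         elif a!='-' and b=='-':
--             i_f += 1
--         elif a=='-' and b!='-':
--             i_o += 1
--     return mapping
-- ===== SOURCE B (Python) =====
-- def compute_index_mapping(aligned_filtered, aligned_original):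
--     # Two-pass: build prefix-count tables of non-gap characters, then a
--     # dict comprehension over columns where both characters are non-gap.
--     pairs = list(zip(aligned_filtered, aligned_original))
--     f_prefix, o_prefix, f, o = [], [], 0, 0
--     for a, b in pairs:
--         f_prefix.append(f)
--         o_prefix.append(o)
--         f += a != '-'
--         o += b != '-'
--     return {f: o for (a, b), f, o in zip(pairs, f_prefix, o_prefix)
--             if a != '-' and b != '-'}
-- ===== Notes on version B (the rewrite author's own statement) =====
-- stated objective: alternative
-- what changed: Replaced the single interleaved counter loop with a two-pass structure: first build prefix-count tables of non-gap characters for both sequences, then a dict comprehension over the zipped columns filters the double-non-gap columns and reads the two indices from the tables.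
import Mathlib
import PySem

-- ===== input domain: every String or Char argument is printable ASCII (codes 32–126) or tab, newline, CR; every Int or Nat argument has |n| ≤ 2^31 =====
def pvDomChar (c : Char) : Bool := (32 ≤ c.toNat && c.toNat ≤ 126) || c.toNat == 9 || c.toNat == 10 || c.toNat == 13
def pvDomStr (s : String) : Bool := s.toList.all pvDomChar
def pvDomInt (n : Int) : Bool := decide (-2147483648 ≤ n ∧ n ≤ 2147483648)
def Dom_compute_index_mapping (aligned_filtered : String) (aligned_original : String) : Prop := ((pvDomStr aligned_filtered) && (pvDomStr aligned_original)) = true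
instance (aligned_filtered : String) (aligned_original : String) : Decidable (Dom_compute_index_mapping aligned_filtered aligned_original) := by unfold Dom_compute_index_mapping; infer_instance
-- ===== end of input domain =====

-- B replaces A's interleaved counter loop by a two-pass structure (prefix-count
-- tables, then a filtering comprehension); objective: alternative decomposition.

-- ===== PORT A =====
-- one loop over the zipped columns, carrying (mapping, i_f, i_o)
def compute_index_mapping (aligned_filtered : String) (aligned_original : String) : List (Int × Int) :=
  let st := (aligned_filtered.toList.zip aligned_original.toList).foldl
    (fun (st : PySem.Dict Int Int × Int × Int) (p : Char × Char) =>
      if p.1 ≠ '-' ∧ p.2 ≠ '-' then (st.1.insert st.2.1 st.2.2, st.2.1 + 1, st.2.2 + 1)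
      else if p.1 ≠ '-' ∧ p.2 = '-' then (st.1, st.2.1 + 1, st.2.2)
      else if p.1 = '-' ∧ p.2 ≠ '-' then (st.1, st.2.1, st.2.2 + 1)
      else st)
    (PySem.Dict.empty, 0, 0)
  st.1.items

-- ===== PORT B =====
-- pass 1: prefix-count tables; pass 2: dict comprehension over zip(pairs, f_prefix, o_prefix)
def compute_index_mapping_alt (aligned_filtered : String) (aligned_original : String) : List (Int × Int) :=
  let pairs := aligned_filtered.toList.zip aligned_original.toList
  let st := pairs.foldl
    (fun (st : List Int × List Int × Int × Int) (p : Char × Char) =>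
      (st.1 ++ [st.2.2.1], st.2.1 ++ [st.2.2.2],
       st.2.2.1 + (if p.1 ≠ '-' then 1 else 0), st.2.2.2 + (if p.2 ≠ '-' then 1 else 0)))
    ([], [], 0, 0)
  ((pairs.zip (st.1.zip st.2.1)).foldl
    (fun (d : PySem.Dict Int Int) (q : (Char × Char) × Int × Int) =>
      if q.1.1 ≠ '-' ∧ q.1.2 ≠ '-' then d.insert q.2.1 q.2.2 else d)
    PySem.Dict.empty).items

-- ===== PRECONDITION & SPEC =====
def Spec_compute_index_mapping (aligned_filtered : String) (aligned_original : String) (out : List (Int × Int)) : Prop := out = compute_index_mapping_alt aligned_filtered aligned_original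
instance (aligned_filtered : String) (aligned_original : String) (out : List (Int × Int)) : Decidable (Spec_compute_index_mapping aligned_filtered aligned_original out) := by unfold Spec_compute_index_mapping; infer_instance

-- ===== CLAIM (what is proved, stated in full; the proofs are below) =====
def Claim_equal_compute_index_mapping : Prop := ∀ (aligned_filtered : String) (aligned_original : String), Dom_compute_index_mapping aligned_filtered aligned_original → Spec_compute_index_mapping aligned_filtered aligned_original (compute_index_mapping aligned_filtered aligned_original)

-- ===== LEMMAS AND PROOFS =====

-- abbreviation of the common result: columns where both chars are non-gap,
-- labelled with running non-gap counts (f, o)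
def pvSpec : List (Char × Char) → Int → Int → List (Int × Int)
  | [], _, _ => []
  | (a, b) :: t, f, o =>
    (if a ≠ '-' ∧ b ≠ '-' then [(f, o)] else []) ++
      pvSpec t (f + (if a ≠ '-' then 1 else 0)) (o + (if b ≠ '-' then 1 else 0))

-- the column labels B's pass 1 produces
def pvPref : List (Char × Char) → Int → Int → List (Int × Int)
  | [], _, _ => []
  | (a, b) :: t, f, o =>
    (f, o) :: pvPref t (f + (if a ≠ '-' then 1 else 0)) (o + (if b ≠ '-' then 1 else 0))

lemma loopA_items : ∀ (l : List (Char × Char)) (d : PySem.Dict Int Int) (f o : Int),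
    (∀ k ∈ d.keys, k < f) → d.keys.Nodup →
    (l.foldl
      (fun (st : PySem.Dict Int Int × Int × Int) (p : Char × Char) =>
        if p.1 ≠ '-' ∧ p.2 ≠ '-' then (st.1.insert st.2.1 st.2.2, st.2.1 + 1, st.2.2 + 1)
        else if p.1 ≠ '-' ∧ p.2 = '-' then (st.1, st.2.1 + 1, st.2.2)
        else if p.1 = '-' ∧ p.2 ≠ '-' then (st.1, st.2.1, st.2.2 + 1)
        else st)
      (d, f, o)).1.items = d.items ++ pvSpec l f o := by
  intro l
  induction l with
  | nil => intro d f o _ _; simp [pvSpec]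
  | cons p t ih =>
    intro d f o hlt hnd
    obtain ⟨a, b⟩ := p
    by_cases hc : a ≠ '-' ∧ b ≠ '-'
    · -- both non-gap: insert a fresh key f
      have hcf : d.contains f = false := by
        by_contra h
        have h' : d.contains f = true := by simpa using h
        have := hlt f ((PySem.Dict.contains_iff_mem_keys d f).mp h')
        omega
      have hnd' : (d.insert f o).keys.Nodup := PySem.Dict.nodup_keys_insert d f o hnd
      have hlt' : ∀ k ∈ (d.insert f o).keys, k < f + 1 := by
        intro k hk
        rcases (PySem.Dict.mem_keys_insert d f k o).mp hk with h | h
        · omega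
        · have := hlt k h; omega
      simp only [List.foldl_cons, if_pos hc]
      rw [ih (d.insert f o) (f + 1) (o + 1) hlt' hnd',
        PySem.Dict.items_insert_of_not_contains d o hcf]
      simp [pvSpec, hc.1, hc.2]
    · by_cases ha : a = '-' <;> by_cases hb : b = '-'
      · simp only [List.foldl_cons, ha, hb]
        rw [if_neg (by simp), if_neg (by simp), if_neg (by simp)]
        rw [ih d f o hlt hnd]
        simp [pvSpec]
      · simp only [List.foldl_cons, ha]
        rw [if_neg (by simp), if_neg (by simp), if_pos (by simp [hb])]
        rw [ih d f (o + 1) hlt hnd]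
        simp [pvSpec, hb]
      · simp only [List.foldl_cons, hb]
        rw [if_neg (by simp), if_pos (by simp [ha])]
        rw [ih d (f + 1) o (fun k hk => by have := hlt k hk; omega) hnd]
        simp [pvSpec, ha]
      · exact absurd ⟨ha, hb⟩ hc

lemma loopB_pref : ∀ (l : List (Char × Char)) (fp op : List Int) (f o : Int),
    l.foldl
      (fun (st : List Int × List Int × Int × Int) (p : Char × Char) =>
        (st.1 ++ [st.2.2.1], st.2.1 ++ [st.2.2.2],
         st.2.2.1 + (if p.1 ≠ '-' then 1 else 0), st.2.2.2 + (if p.2 ≠ '-' then 1 else 0)))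
      (fp, op, f, o)
    = (fp ++ (pvPref l f o).map Prod.fst, op ++ (pvPref l f o).map Prod.snd,
       f + ((l.map Prod.fst).countP (fun a => a ≠ '-') : Int),
       o + ((l.map Prod.snd).countP (fun b => b ≠ '-') : Int)) := by
  intro l
  induction l with
  | nil => intro fp op f o; simp [pvPref]
  | cons p t ih =>
    intro fp op f o
    obtain ⟨a, b⟩ := p
    simp only [List.foldl_cons, ih, pvPref, List.map_cons, List.countP_cons]
    refine Prod.ext (by simp) (Prod.ext (by simp) (Prod.ext ?_ ?_)) <;>
      by_cases h : a = '-' <;> by_cases h' : b = '-' <;>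
        simp [h, h'] <;> ring

lemma zip_pref : ∀ (l : List (Char × Char)) (f o : Int),
    ((pvPref l f o).map Prod.fst).zip ((pvPref l f o).map Prod.snd) = pvPref l f o := by
  intro l f o
  rw [List.zip_map']
  simp

lemma loopB_dict : ∀ (l : List (Char × Char)) (f o : Int) (d : PySem.Dict Int Int),
    (∀ k ∈ d.keys, k < f) → d.keys.Nodup →
    ((l.zip (pvPref l f o)).foldl
      (fun (d : PySem.Dict Int Int) (q : (Char × Char) × Int × Int) =>
        if q.1.1 ≠ '-' ∧ q.1.2 ≠ '-' then d.insert q.2.1 q.2.2 else d)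
      d).items = d.items ++ pvSpec l f o := by
  intro l
  induction l with
  | nil => intro f o d _ _; simp [pvPref, pvSpec]
  | cons p t ih =>
    intro f o d hlt hnd
    obtain ⟨a, b⟩ := p
    simp only [pvPref, pvSpec, List.zip_cons_cons, List.foldl_cons]
    by_cases hc : a ≠ '-' ∧ b ≠ '-'
    · have hcf : d.contains f = false := by
        by_contra h
        have h' : d.contains f = true := by simpa using h
        have := hlt f ((PySem.Dict.contains_iff_mem_keys d f).mp h')
        omega
      rw [if_pos hc, if_pos hc,
        ih _ _ (d.insert f o)
          (fun k hk => by
            rcases (PySem.Dict.mem_keys_insert d f k o).mp hk with h | h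
            · subst h; rw [if_pos hc.1]; omega
            · have := hlt k h; split_ifs <;> omega)
          (PySem.Dict.nodup_keys_insert d f o hnd),
        PySem.Dict.items_insert_of_not_contains d o hcf]
      simp
    · rw [if_neg hc, if_neg hc,
        ih _ _ d (fun k hk => by have := hlt k hk; split_ifs <;> omega) hnd]
      simp

-- ===== VERDICT (by name: the statement is the Claim_ definition above) =====
theorem compute_index_mapping_spec : Claim_equal_compute_index_mapping := by
  intro af ao _
  unfold Spec_compute_index_mapping
  dsimp only [compute_index_mapping, compute_index_mapping_alt]
  rw [loopA_items _ PySem.Dict.empty 0 0 (by simp) (by simp), loopB_pref]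
  simp only [List.nil_append]
  rw [zip_pref, loopB_dict _ 0 0 PySem.Dict.empty (by simp) (by simp)]
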